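-- pv_equiv track=rewrite | github.com/liampelikan/Battleship_Solver_App | battleshiphelper.py | _find_ship_candidates
-- ===== SOURCE A (Python) =====
-- GRID_SIZE = 10
--
-- def _find_ship_candidates(available_hits, length):
--     candidates = []
--     hit_set = set(available_hits)
--     for r in range(GRID_SIZE):
--         for c in range(GRID_SIZE - length + 1):
--             segment = [(r, c + i) for i in range(length)]
--             if all(cell in hit_set for cell in segment): candidates.append(segment)
--     for c in range(GRID_SIZE):
--         for r in range(GRID_SIZE - length + 1):
--             segment = [(r + i, c) for i in range(length)]
--             if all(cell in hit_set for cell in segment): candidates.append(segment)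
--     return candidates
-- ===== SOURCE B (Python) =====
-- GRID_SIZE = 10
--
-- def _find_ship_candidates(available_hits, length):
--     if length < 1:
--         return []
--     hit_set = set(available_hits)
--     candidates = []
--     for r in range(GRID_SIZE):
--         run = 0
--         for c in range(GRID_SIZE):
--             run = run + 1 if (r, c) in hit_set else 0
--             if run >= length:
--                 candidates.append([(r, c - length + 1 + i) for i in range(length)])
--     for c in range(GRID_SIZE):
--         run = 0
--         for r in range(GRID_SIZE):
--             run = run + 1 if (r, c) in hit_set else 0
--             if run >= length:
--                 candidates.append([(r - length + 1 + i, c) for i in range(length)])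
--     return candidates
-- ===== Notes on version B (the rewrite author's own statement) =====
-- stated objective: alternative
-- what changed: Replaces the per-start window check (all() over a fresh length-window at every start position) by a single incremental run-length counter per row and per column, emitting a segment each time the counter of consecutive hits reaches the ship length; total cost is dominated by building the hit set, so no speedup is claimed.
import Mathlib
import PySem

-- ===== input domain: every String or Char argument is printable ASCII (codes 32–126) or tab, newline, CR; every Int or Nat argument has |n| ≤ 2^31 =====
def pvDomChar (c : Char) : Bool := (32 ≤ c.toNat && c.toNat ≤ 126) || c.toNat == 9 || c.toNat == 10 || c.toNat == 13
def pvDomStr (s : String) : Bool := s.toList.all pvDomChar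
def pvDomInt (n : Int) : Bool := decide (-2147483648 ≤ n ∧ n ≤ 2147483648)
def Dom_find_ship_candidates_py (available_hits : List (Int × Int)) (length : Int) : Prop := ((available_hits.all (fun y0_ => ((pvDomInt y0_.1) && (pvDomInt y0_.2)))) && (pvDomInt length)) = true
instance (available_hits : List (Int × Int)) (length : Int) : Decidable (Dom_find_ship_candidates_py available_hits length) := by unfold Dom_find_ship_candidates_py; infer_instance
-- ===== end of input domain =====

-- B replaces A's per-start window re-scan by one incremental run-length counter per row and per
-- column (same output, same order); no speed claim — both are dominated by building the hit set.

-- ===== PORT A =====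
def find_ship_candidates_py (available_hits : List (Int × Int)) (length : Int) : List (List (Int × Int)) :=
  let hit_set : PySem.Set (Int × Int) := PySem.Set.ofList available_hits
  let candidates : List (List (Int × Int)) := []
  let candidates := (PySem.List.pyRange 0 10 1).foldl (fun candidates r =>
    (PySem.List.pyRange 0 (10 - length + 1) 1).foldl (fun candidates c =>
      let segment := (PySem.List.pyRange 0 length 1).map (fun i => (r, c + i))
      if segment.all (fun cell => PySem.Set.contains hit_set cell) then candidates ++ [segment]
      else candidates) candidates) candidates
  (PySem.List.pyRange 0 10 1).foldl (fun candidates c =>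
    (PySem.List.pyRange 0 (10 - length + 1) 1).foldl (fun candidates r =>
      let segment := (PySem.List.pyRange 0 length 1).map (fun i => (r + i, c))
      if segment.all (fun cell => PySem.Set.contains hit_set cell) then candidates ++ [segment]
      else candidates) candidates) candidates

-- ===== PORT B =====
def find_ship_candidates_py_alt (available_hits : List (Int × Int)) (length : Int) : List (List (Int × Int)) :=
  if length < 1 then []
  else
    let hit_set : PySem.Set (Int × Int) := PySem.Set.ofList available_hits
    let candidates : List (List (Int × Int)) := []
    let candidates := (PySem.List.pyRange 0 10 1).foldl (fun candidates r =>
      ((PySem.List.pyRange 0 10 1).foldl (fun (st : Int × List (List (Int × Int))) c =>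
        (if PySem.Set.contains hit_set (r, c) then st.1 + 1 else 0,
         if (if PySem.Set.contains hit_set (r, c) then st.1 + 1 else 0) ≥ length then
           st.2 ++ [(PySem.List.pyRange 0 length 1).map (fun i => (r, c - length + 1 + i))]
         else st.2)) ((0 : Int), candidates)).2) candidates
    (PySem.List.pyRange 0 10 1).foldl (fun candidates c =>
      ((PySem.List.pyRange 0 10 1).foldl (fun (st : Int × List (List (Int × Int))) r =>
        (if PySem.Set.contains hit_set (r, c) then st.1 + 1 else 0,
         if (if PySem.Set.contains hit_set (r, c) then st.1 + 1 else 0) ≥ length then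
           st.2 ++ [(PySem.List.pyRange 0 length 1).map (fun i => (r - length + 1 + i, c))]
         else st.2)) ((0 : Int), candidates)).2) candidates

-- ===== PRECONDITION & SPEC =====
-- Pre_ excludes nonpositive ship lengths: there A returns 2·10·(11−length) copies of the empty
-- segment (one per degenerate window position), a value no caller would use and whose size grows
-- without bound as length decreases (the literal port cannot be evaluated there); B returns [].
def Pre_find_ship_candidates_py (available_hits : List (Int × Int)) (length : Int) : Prop :=
  1 ≤ length

instance (available_hits : List (Int × Int)) (length : Int) : Decidable (Pre_find_ship_candidates_py available_hits length) := by
  unfold Pre_find_ship_candidates_py; infer_instance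

def pvWitness_find_ship_candidates_py : (List (Int × Int)) × Int := ([(0, 0), (0, 1)], 2)

def Spec_find_ship_candidates_py (available_hits : List (Int × Int)) (length : Int) (out : List (List (Int × Int))) : Prop := out = find_ship_candidates_py_alt available_hits length
instance (available_hits : List (Int × Int)) (length : Int) (out : List (List (Int × Int))) : Decidable (Spec_find_ship_candidates_py available_hits length out) := by unfold Spec_find_ship_candidates_py; infer_instance

-- ===== CLAIM (what is proved, stated in full; the proofs are below) =====
def Claim_equal_find_ship_candidates_py : Prop := ∀ (available_hits : List (Int × Int)) (length : Int), Dom_find_ship_candidates_py available_hits length → Pre_find_ship_candidates_py available_hits length → Spec_find_ship_candidates_py available_hits length (find_ship_candidates_py available_hits length)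

-- ===== LEMMAS AND PROOFS =====

-- run-length counter after scanning cells 0,…,n−1 of one line (h = "cell is a hit")
def pvRunC (h : Int → Bool) : Nat → Int
  | 0 => 0
  | n + 1 => if h (n : Int) then pvRunC h n + 1 else 0

-- segments B's scan has emitted after scanning cells 0,…,n−1
def pvEmitB (h : Int → Bool) (g : Int → List (Int × Int)) (L : Int) : Nat → List (List (Int × Int))
  | 0 => []
  | n + 1 => pvEmitB h g L n ++ (if L ≤ pvRunC h (n + 1) then [g ((n : Int) - L + 1)] else [])

-- segments A's window loop has emitted after trying starts 0,…,k−1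
def pvEmitA (h : Int → Bool) (g : Int → List (Int × Int)) (L : Int) : Nat → List (List (Int × Int))
  | 0 => []
  | k + 1 => pvEmitA h g L k ++
      (if (PySem.List.pyRange 0 L 1).all (fun i => h ((k : Int) + i)) then [g (k : Int)] else [])

lemma pvRunC_nonneg (h : Int → Bool) (n : Nat) : 0 ≤ pvRunC h n := by
  induction n with
  | zero => simp [pvRunC]
  | succ n ih => simp only [pvRunC]; split <;> omega

lemma pvRunC_le (h : Int → Bool) (n : Nat) : pvRunC h n ≤ (n : Int) := by
  induction n with
  | zero => simp [pvRunC]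
  | succ n ih => simp only [pvRunC]; split <;> push_cast <;> omega

-- the counter reaches L at cell n−1 iff the L cells ending there are all hits
lemma pvRunC_window (h : Int → Bool) : ∀ (n : Nat) (L : Int), 1 ≤ L →
    (L ≤ pvRunC h n ↔ (L ≤ (n : Int) ∧ ∀ i : Int, 0 ≤ i → i < L → h ((n : Int) - L + i) = true)) := by
  intro n
  induction n with
  | zero =>
    intro L hL
    simp only [pvRunC, Nat.cast_zero]
    constructor
    · intro hc; omega
    · rintro ⟨hc, -⟩; omega
  | succ n ih =>
    intro L hL
    have hcast : ((n + 1 : Nat) : Int) = (n : Int) + 1 := by push_cast; ring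
    rw [hcast]
    by_cases hb : h (n : Int) = true
    · rcases eq_or_lt_of_le hL with h1 | h2
      · rw [← h1]
        simp only [pvRunC, hb, if_true]
        have hnn := pvRunC_nonneg h n
        constructor
        · intro _
          refine ⟨by omega, ?_⟩
          intro i hi0 hi1
          have : i = 0 := by omega
          subst this
          have : (n : Int) + 1 - 1 + 0 = (n : Int) := by ring
          rw [this, hb]
        · intro _; omega
      · have hi := ih (L - 1) (by omega)
        simp only [pvRunC, hb, if_true]
        constructor
        · intro hc
          obtain ⟨hn, hall⟩ := hi.mp (by omega)
          refine ⟨by omega, ?_⟩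
          intro i hi0 hiL
          rcases lt_or_ge i (L - 1) with hlt | hge
          · have := hall i hi0 hlt
            have harg : (n : Int) - (L - 1) + i = (n : Int) + 1 - L + i := by ring
            rw [harg] at this
            exact this
          · have hieq : i = L - 1 := by omega
            subst hieq
            have harg : (n : Int) + 1 - L + (L - 1) = (n : Int) := by ring
            rw [harg, hb]
        · rintro ⟨hn, hall⟩
          have : L - 1 ≤ pvRunC h n := by
            apply hi.mpr
            refine ⟨by omega, ?_⟩
            intro i hi0 hiL
            have := hall i hi0 (by omega)
            have harg : (n : Int) + 1 - L + i = (n : Int) - (L - 1) + i := by ring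
            rw [harg] at this
            exact this
          omega
    · simp only [Bool.not_eq_true] at hb
      simp only [pvRunC, hb, Bool.false_eq_true, if_false]
      constructor
      · intro hc; omega
      · rintro ⟨hn, hall⟩
        have hx := hall (L - 1) (by omega) (by omega)
        have harg : (n : Int) + 1 - L + (L - 1) = (n : Int) := by ring
        rw [harg, hb] at hx
        exact absurd hx (by simp)

-- B's per-line fold, characterised
lemma pvFoldB (h : Int → Bool) (g : Int → List (Int × Int)) (L : Int) :
    ∀ (n : Nat) (acc : List (List (Int × Int))),
    (PySem.List.pyRange 0 (n : Int) 1).foldl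
      (fun (st : Int × List (List (Int × Int))) c =>
        (if h c then st.1 + 1 else 0,
         if (if h c then st.1 + 1 else 0) ≥ L then st.2 ++ [g (c - L + 1)] else st.2))
      ((0 : Int), acc)
    = (pvRunC h n, acc ++ pvEmitB h g L n) := by
  intro n
  induction n with
  | zero =>
    intro acc
    rw [Nat.cast_zero, PySem.List.pyRange_one_eq_nil (le_refl (0 : Int))]
    simp [pvRunC, pvEmitB]
  | succ n ih =>
    intro acc
    have hcast : ((n + 1 : Nat) : Int) = (n : Int) + 1 := by push_cast; ring
    rw [hcast, PySem.List.pyRange_one_succ_right (by positivity)]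
    rw [List.foldl_append, ih acc]
    simp only [List.foldl_cons, List.foldl_nil]
    have hrun : (if h (n : Int) then pvRunC h n + 1 else 0) = pvRunC h (n + 1) := rfl
    rw [hrun]
    simp only [pvEmitB, ge_iff_le]
    split <;> simp

-- A's per-line fold, characterised
lemma pvFoldA (h : Int → Bool) (g : Int → List (Int × Int)) (L : Int) :
    ∀ (k : Nat) (acc : List (List (Int × Int))),
    (PySem.List.pyRange 0 (k : Int) 1).foldl
      (fun acc s => if (PySem.List.pyRange 0 L 1).all (fun i => h (s + i)) then acc ++ [g s] else acc)
      acc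
    = acc ++ pvEmitA h g L k := by
  intro k
  induction k with
  | zero =>
    intro acc
    rw [Nat.cast_zero, PySem.List.pyRange_one_eq_nil (le_refl (0 : Int))]
    simp [pvEmitA]
  | succ k ih =>
    intro acc
    have hcast : ((k + 1 : Nat) : Int) = (k : Int) + 1 := by push_cast; ring
    rw [hcast, PySem.List.pyRange_one_succ_right (by positivity)]
    rw [List.foldl_append, ih acc]
    simp only [List.foldl_cons, List.foldl_nil, pvEmitA]
    split <;> simp

-- the two emission sequences coincide
lemma pvEmit_eq (h : Int → Bool) (g : Int → List (Int × Int)) (L : Int) (hL : 1 ≤ L) :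
    ∀ n : Nat, pvEmitB h g L n = pvEmitA h g L (n + 1 - L.toNat) := by
  intro n
  induction n with
  | zero =>
    rw [Nat.sub_eq_zero_of_le (by omega)]
    simp [pvEmitB, pvEmitA]
  | succ n ih =>
    by_cases hle : L.toNat ≤ n + 1
    · have hidx : n + 1 + 1 - L.toNat = (n + 1 - L.toNat) + 1 := by omega
      rw [hidx]
      simp only [pvEmitB, pvEmitA, ih]
      congr 1
      have hk : ((n + 1 - L.toNat : Nat) : Int) = (n : Int) - L + 1 := by
        have hLt : (L.toNat : Int) = L := Int.toNat_of_nonneg (by omega)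
        omega
      have hcond : (L ≤ pvRunC h (n + 1)) ↔
          ((PySem.List.pyRange 0 L 1).all (fun i => h (((n + 1 - L.toNat : Nat) : Int) + i)) = true) := by
        rw [pvRunC_window h (n + 1) L hL]
        rw [List.all_eq_true]
        constructor
        · rintro ⟨hn, hall⟩ i hi
          rw [PySem.List.mem_pyRange_one] at hi
          have := hall i hi.1 hi.2
          have harg : ((n + 1 : Nat) : Int) - L + i = ((n + 1 - L.toNat : Nat) : Int) + i := by
            rw [hk]; push_cast; ring
          rw [harg] at this
          exact this
        · intro hall
          have hLt : (L.toNat : Int) = L := Int.toNat_of_nonneg (by omega)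
          refine ⟨by push_cast; omega, ?_⟩
          intro i hi0 hiL
          have := hall i (by rw [PySem.List.mem_pyRange_one]; exact ⟨hi0, hiL⟩)
          have harg : ((n + 1 - L.toNat : Nat) : Int) + i = ((n + 1 : Nat) : Int) - L + i := by
            rw [hk]; push_cast; ring
          rw [harg] at this
          exact this
      rw [hk] at hcond ⊢
      by_cases hc : L ≤ pvRunC h (n + 1)
      · rw [if_pos hc, if_pos (hcond.mp hc)]
      · rw [if_neg hc, if_neg (fun hx => hc (hcond.mpr hx))]
    · have hidx : n + 1 + 1 - L.toNat = n + 1 - L.toNat := by omega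
      rw [hidx]
      simp only [pvEmitB, ih]
      have : ¬ L ≤ pvRunC h (n + 1) := by
        have h1 := pvRunC_le h (n + 1)
        have hLt : (L.toNat : Int) = L := Int.toNat_of_nonneg (by omega)
        push_cast at h1 ⊢
        omega
      rw [if_neg this]
      simp

-- one line of the grid: B's run-length scan = A's window loop
lemma pvRow_eq (h : Int → Bool) (g : Int → List (Int × Int)) (L : Int) (hL : 1 ≤ L)
    (acc : List (List (Int × Int))) :
    ((PySem.List.pyRange 0 10 1).foldl
      (fun (st : Int × List (List (Int × Int))) c =>
        (if h c then st.1 + 1 else 0,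
         if (if h c then st.1 + 1 else 0) ≥ L then st.2 ++ [g (c - L + 1)] else st.2))
      ((0 : Int), acc)).2
    = (PySem.List.pyRange 0 (10 - L + 1) 1).foldl
      (fun acc s => if (PySem.List.pyRange 0 L 1).all (fun i => h (s + i)) then acc ++ [g s] else acc)
      acc := by
  have h10 : (10 : Int) = ((10 : Nat) : Int) := by norm_num
  by_cases hle : L ≤ 10
  · have hbound : (10 : Int) - L + 1 = ((11 - L.toNat : Nat) : Int) := by
      have hLt : (L.toNat : Int) = L := Int.toNat_of_nonneg (by omega)
      omega
    rw [hbound, h10, pvFoldB h g L 10 acc, pvFoldA h g L (11 - L.toNat) acc]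
    simp only [pvEmit_eq h g L hL 10]
  · have hnil : PySem.List.pyRange 0 (10 - L + 1) 1 = [] :=
      PySem.List.pyRange_one_eq_nil (by omega)
    rw [hnil, h10, pvFoldB h g L 10 acc]
    simp only [List.foldl_nil]
    have hz : 10 + 1 - L.toNat = 0 := by omega
    rw [pvEmit_eq h g L hL 10, hz]
    simp [pvEmitA]

-- ===== VERDICT (by name: the statement is the Claim_ definition above) =====
theorem find_ship_candidates_py_spec : Claim_equal_find_ship_candidates_py := by
  intro available_hits length hDom hPre
  unfold Pre_find_ship_candidates_py at hPre
  unfold Spec_find_ship_candidates_py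
  unfold find_ship_candidates_py find_ship_candidates_py_alt
  rw [if_neg (by omega : ¬ length < 1)]
  simp only [List.all_map]
  congr 1
  · funext acc c
    exact (pvRow_eq (fun x => PySem.Set.contains (PySem.Set.ofList available_hits) (x, c))
      (fun s => (PySem.List.pyRange 0 length 1).map (fun i => (s + i, c))) length hPre acc).symm
  · congr 1
    funext acc r
    exact (pvRow_eq (fun x => PySem.Set.contains (PySem.Set.ofList available_hits) (r, x))
      (fun s => (PySem.List.pyRange 0 length 1).map (fun i => (r, s + i))) length hPre acc).symm
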